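-- pv_equiv track=rewrite | github.com/kraktus/call-my-agent | src/agent_logic.py | sanitize_tag_component
-- ===== SOURCE A (Python) =====
-- def sanitize_tag_component(value: str) -> str:
--     value = value.lower().strip()
--     result = []
--     last_hyphen = False
--     for char in value:
--         if char.isalnum():
--             result.append(char)
--             last_hyphen = False
--         elif char == '.':
--             result.append('.')
--             last_hyphen = False
--         elif char in '+@:/_-':
--             if not last_hyphen:
--                 result.append('-')
--                 last_hyphen = True
--     return "".join(result).strip('-')
-- ===== SOURCE B (Python) =====
-- import re
--
--
-- def sanitize_tag_component(value: str) -> str: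
--     value = value.lower().strip()
--     mapped = "".join(
--         c if (c.isalnum() or c == '.') else ('-' if c in '+@:/_-' else '')
--         for c in value
--     )
--     return re.sub(r'-+', '-', mapped).strip('-')
-- ===== Notes on version B (the rewrite author's own statement) =====
-- stated objective: simpler
-- what changed: Replaces the inline last_hyphen state machine with a stateless classify-map pass (each character kept, turned into a hyphen, or dropped) followed by a separate regex pass collapsing hyphen runs and a final hyphen strip.
import Mathlib
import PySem

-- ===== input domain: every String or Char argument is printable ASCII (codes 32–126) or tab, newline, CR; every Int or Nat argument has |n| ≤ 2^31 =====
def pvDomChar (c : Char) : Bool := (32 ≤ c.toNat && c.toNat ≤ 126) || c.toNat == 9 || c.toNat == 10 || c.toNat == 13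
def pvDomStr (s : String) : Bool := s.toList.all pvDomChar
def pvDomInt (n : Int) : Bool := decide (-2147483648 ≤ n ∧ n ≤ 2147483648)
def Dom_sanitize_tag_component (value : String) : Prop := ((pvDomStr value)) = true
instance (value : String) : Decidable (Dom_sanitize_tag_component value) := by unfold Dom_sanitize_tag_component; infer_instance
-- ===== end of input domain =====

-- B replaces A's inline last_hyphen state machine with a stateless classify-map pass
-- followed by a separate hyphen-run-collapsing pass (simpler decomposition, same cost).

-- ===== PORT A =====
-- A's for-loop: state = (result, last_hyphen), branches in A's order
def saLoop : List Char → List Char → Bool → List Char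
  | [], acc, _ => acc
  | c :: rest, acc, lastHyphen =>
    if PySem.Chars.isalnum c then saLoop rest (acc ++ [c]) false
    else if c = '.' then saLoop rest (acc ++ ['.']) false
    else if ['+', '@', ':', '/', '_', '-'].contains c then
      if !lastHyphen then saLoop rest (acc ++ ['-']) true
      else saLoop rest acc lastHyphen
    else saLoop rest acc lastHyphen

def sanitize_tag_component (value : String) : String :=
  let v := PySem.Chars.strip (PySem.Chars.lower value.toList)
  String.mk (PySem.Chars.stripChars (saLoop v [] false) ['-'])

-- ===== PORT B =====
-- the per-char classification of Source B's comprehension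
def sbClassify (c : Char) : List Char :=
  if PySem.Chars.isalnum c || c = '.' then [c]
  else if ['+', '@', ':', '/', '_', '-'].contains c then ['-'] else []

-- hand port of re.sub(r'-+', '-', s): replace each maximal run of '-' by one '-'
-- (exact for this fixed pattern; inRun tracks being inside a '-' run)
def sbCollapse : List Char → Bool → List Char
  | [], _ => []
  | c :: rest, inRun =>
    if c = '-' then (if inRun then sbCollapse rest true else '-' :: sbCollapse rest true)
    else c :: sbCollapse rest false

def sanitize_tag_component_alt (value : String) : String :=
  let v := PySem.Chars.strip (PySem.Chars.lower value.toList)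
  String.mk (PySem.Chars.stripChars (sbCollapse (v.flatMap sbClassify) false) ['-'])

-- ===== PRECONDITION & SPEC =====
def Spec_sanitize_tag_component (value : String) (out : String) : Prop := out = sanitize_tag_component_alt value
instance (value : String) (out : String) : Decidable (Spec_sanitize_tag_component value out) := by unfold Spec_sanitize_tag_component; infer_instance

-- ===== CLAIM (what is proved, stated in full; the proofs are below) =====
def Claim_equal_sanitize_tag_component : Prop := ∀ (value : String), Dom_sanitize_tag_component value → Spec_sanitize_tag_component value (sanitize_tag_component value)

-- ===== LEMMAS AND PROOFS =====

lemma isalnum_ne_hyphen {c : Char} (h : PySem.Chars.isalnum c = true) : c ≠ '-' := by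
  intro he; subst he; exact absurd h (by decide)

-- A's loop from state (acc, lh) produces acc ++ the collapsed classification of the rest
lemma saLoop_eq (cs : List Char) (acc : List Char) (lh : Bool) :
    saLoop cs acc lh = acc ++ sbCollapse (cs.flatMap sbClassify) lh := by
  induction cs generalizing acc lh with
  | nil => simp [saLoop, sbCollapse]
  | cons c rest ih =>
    by_cases h1 : PySem.Chars.isalnum c = true
    · have hne : c ≠ '-' := isalnum_ne_hyphen h1
      simp [saLoop, sbClassify, sbCollapse, h1, hne, ih]
    · by_cases h2 : c = '.'
      · subst h2
        simp [saLoop, sbClassify, sbCollapse, h1, ih]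
      · by_cases h3 : ['+', '@', ':', '/', '_', '-'].contains c = true
        · have h3' : c = '+' ∨ c = '@' ∨ c = ':' ∨ c = '/' ∨ c = '_' ∨ c = '-' := by
            simpa using h3
          cases lh with
          | false => simp [saLoop, sbClassify, sbCollapse, h1, h2, h3, h3', ih]
          | true => simp [saLoop, sbClassify, sbCollapse, h1, h2, h3, h3', ih]
        · have h3' : ¬(c = '+' ∨ c = '@' ∨ c = ':' ∨ c = '/' ∨ c = '_' ∨ c = '-') := by
            simpa using h3
          simp [saLoop, sbClassify, sbCollapse, h1, h2, h3, h3', ih]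

-- ===== VERDICT (by name: the statement is the Claim_ definition above) =====
theorem sanitize_tag_component_spec : Claim_equal_sanitize_tag_component := by
  intro value _
  unfold Spec_sanitize_tag_component sanitize_tag_component sanitize_tag_component_alt
  simp only [saLoop_eq, List.nil_append]
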